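-- pv_equiv track=rewrite | github.com/vaithak/Connect4_AI | connect4_game/helpers.py | verify_board_state_difference
-- ===== SOURCE A (Python) =====
-- def verify_board_state_difference(active, prev_board_state, state):
-- 	count=0
-- 	for i in range(6):
-- 		for j in range(7):
-- 			if(prev_board_state[i*7 + j] != '0') and (state[i*7 + j] != prev_board_state[i*7 + j]):
-- 				return False
-- 			elif (prev_board_state[i*7 + j] == '0') and (state[i*7 + j] != prev_board_state[i*7 + j]):
-- 				if state[i*7 + j] != active:
-- 					return False
-- 				else:
-- 					count=count+1
-- 	return (count == 1)
-- ===== SOURCE B (Python) =====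
-- def verify_board_state_difference(active, prev_board_state, state):
--     # Phase 1: locate the first change point.
--     k = 0
--     while k < 42 and prev_board_state[k] == state[k]:
--         k += 1
--     if k == 42:
--         return False  # nothing changed
--     # Phase 2: the change point must be a fresh disc of the active player.
--     if prev_board_state[k] != '0' or state[k] != active:
--         return False
--     # Phase 3: everything after the change point must be unchanged.
--     return all(prev_board_state[j] == state[j] for j in range(k + 1, 42))
-- ===== Notes on version B (the rewrite author's own statement) =====
-- stated objective: alternative
-- what changed: Replaces A's counter-carrying full 6x7 scan by a three-phase change-point algorithm: a while loop locates the first index where the boards differ, one test classifies that cell as a fresh active-player disc, and a suffix-equality check confirms nothing after it changed; no counter is kept.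
import Mathlib
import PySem

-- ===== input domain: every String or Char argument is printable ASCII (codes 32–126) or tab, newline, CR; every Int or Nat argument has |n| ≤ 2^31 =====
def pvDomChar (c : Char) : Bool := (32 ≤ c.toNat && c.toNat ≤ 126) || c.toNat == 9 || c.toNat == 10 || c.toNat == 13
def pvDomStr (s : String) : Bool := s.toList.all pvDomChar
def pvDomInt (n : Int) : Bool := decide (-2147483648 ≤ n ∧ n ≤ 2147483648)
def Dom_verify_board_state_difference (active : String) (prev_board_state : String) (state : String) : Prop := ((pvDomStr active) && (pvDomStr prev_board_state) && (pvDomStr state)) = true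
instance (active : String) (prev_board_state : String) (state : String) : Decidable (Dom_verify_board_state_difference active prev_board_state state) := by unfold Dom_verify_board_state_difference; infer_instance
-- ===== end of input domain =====

-- B replaces A's counter-carrying full-board scan by a three-phase change-point algorithm
-- (find the first differing index, classify that single cell, check the suffix is unchanged);
-- objective: alternative (same cost, no counter).

-- ===== PORT A =====
-- s[k]: within Pre_ every index actually inspected is in range, so the ' ' default is never taken there.
def pvGetC (str : String) (k : Int) : Char := (PySem.Str.pyGet? str k).getD ' '

-- the body of A's inner loop, threading `count` and the early `return False` as an Except value
def pvAStep (active : String) (prev_board_state : String) (state : String)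
    (acc : Except Bool Int) (k : Int) : Except Bool Int :=
  match acc with
  | .error b => .error b
  | .ok count =>
    if pvGetC prev_board_state k ≠ '0' ∧ pvGetC state k ≠ pvGetC prev_board_state k then
      .error false
    else if pvGetC prev_board_state k = '0' ∧ pvGetC state k ≠ pvGetC prev_board_state k then
      if String.singleton (pvGetC state k) ≠ active then .error false
      else .ok (count + 1)
    else .ok count

def verify_board_state_difference (active : String) (prev_board_state : String) (state : String) : Bool :=
  match (PySem.List.pyRange 0 6 1).foldl
      (fun acc i => (PySem.List.pyRange 0 7 1).foldl
        (fun acc2 j => pvAStep active prev_board_state state acc2 (i * 7 + j)) acc)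
      (Except.ok (0 : Int)) with
  | .error b => b
  | .ok count => decide (count = 1)

-- ===== PORT B =====
-- Phase 1 of B: the `while k < 42 and prev[k] == state[k]: k += 1` loop, as structural
-- recursion on 42 - k.
def pvFindFrom (prev_board_state state : String) (k : Nat) : Nat :=
  if k < 42 then
    if pvGetC prev_board_state (k : Int) == pvGetC state (k : Int) then
      pvFindFrom prev_board_state state (k + 1)
    else k
  else k
termination_by 42 - k

def verify_board_state_difference_alt (active : String) (prev_board_state : String) (state : String) : Bool :=
  let k := pvFindFrom prev_board_state state 0
  if k = 42 then false          -- nothing changed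
  else if pvGetC prev_board_state (k : Int) != '0' || String.singleton (pvGetC state (k : Int)) != active then
    false                        -- the change point is not a fresh active-player disc
  else                           -- everything after the change point must be unchanged
    (PySem.List.pyRange ((k : Int) + 1) 42 1).all
      (fun j => pvGetC prev_board_state j == pvGetC state j)

-- ===== PRECONDITION & SPEC =====
-- Pre_ is exactly the set of inputs on which the Python A returns normally: either both board
-- strings hold a full 6x7 board (42 chars), or the scan meets an invalid difference (at an
-- in-range index below 42) and returns False before reaching an out-of-range index; on all
-- other inputs A raises IndexError.
def Pre_verify_board_state_difference (active : String) (prev_board_state : String) (state : String) : Prop :=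
  (42 ≤ prev_board_state.toList.length ∧ 42 ≤ state.toList.length) ∨
  (∃ k : Nat, k < 42 ∧ k < prev_board_state.toList.length ∧ k < state.toList.length ∧
    pvGetC state (k : Int) ≠ pvGetC prev_board_state (k : Int) ∧
    (pvGetC prev_board_state (k : Int) ≠ '0' ∨ String.singleton (pvGetC state (k : Int)) ≠ active))
instance (active : String) (prev_board_state : String) (state : String) : Decidable (Pre_verify_board_state_difference active prev_board_state state) := by unfold Pre_verify_board_state_difference; infer_instance

def pvWitness_verify_board_state_difference : String × String × String :=
  ("1", "000000000000000000000000000000000000000000", "000000000000000000000000000000000001000000")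

def Spec_verify_board_state_difference (active : String) (prev_board_state : String) (state : String) (out : Bool) : Prop := out = verify_board_state_difference_alt active prev_board_state state
instance (active : String) (prev_board_state : String) (state : String) (out : Bool) : Decidable (Spec_verify_board_state_difference active prev_board_state state out) := by unfold Spec_verify_board_state_difference; infer_instance

-- ===== CLAIM (what is proved, stated in full; the proofs are below) =====
def Claim_equal_verify_board_state_difference : Prop := ∀ (active : String) (prev_board_state : String) (state : String), Dom_verify_board_state_difference active prev_board_state state → Pre_verify_board_state_difference active prev_board_state state → Spec_verify_board_state_difference active prev_board_state state (verify_board_state_difference active prev_board_state state)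

-- ===== LEMMAS AND PROOFS =====

-- proof-side abbreviations: the per-index tests both programs are built from
def pvDiffB (prev_board_state state : String) (k : Int) : Bool :=
  pvGetC state k != pvGetC prev_board_state k
def pvOkB (active prev_board_state state : String) (k : Int) : Bool :=
  (pvGetC prev_board_state k == '0') && (String.singleton (pvGetC state k) == active)

theorem pvAStep_error (active prev_board_state state : String) (ks : List Int) (b : Bool) :
    ks.foldl (pvAStep active prev_board_state state) (.error b) = .error b := by
  induction ks with
  | nil => rfl
  | cons k ks ih => simpa [pvAStep] using ih

-- characterization of A's scan: a bad difference (anywhere) yields `error false`,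
-- otherwise the count of good differences is added
theorem pvAStep_foldl (active prev_board_state state : String) (ks : List Int) (c : Int) :
    ks.foldl (pvAStep active prev_board_state state) (.ok c) =
      if ks.any (fun k => pvDiffB prev_board_state state k && !pvOkB active prev_board_state state k)
      then .error false
      else .ok (c + ((ks.filter (fun k => pvDiffB prev_board_state state k && pvOkB active prev_board_state state k)).length : Int)) := by
  induction ks generalizing c with
  | nil => simp
  | cons k ks ih =>
    rw [List.foldl_cons]
    by_cases hd : pvGetC state k = pvGetC prev_board_state k
    · have h1 : pvDiffB prev_board_state state k = false := by simp [pvDiffB, hd]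
      have hstep : pvAStep active prev_board_state state (.ok c) k = .ok c := by
        simp [pvAStep, hd]
      rw [hstep, ih]
      simp [List.any_cons, h1]
    · have h1 : pvDiffB prev_board_state state k = true := by simp [pvDiffB, hd]
      by_cases hok : pvOkB active prev_board_state state k = true
      · have hp : pvGetC prev_board_state k = '0' := by
          simp [pvOkB] at hok; exact hok.1
        have ha : String.singleton (pvGetC state k) = active := by
          simp [pvOkB] at hok; exact hok.2
        have hd0 : ¬ pvGetC state k = '0' := hp ▸ hd
        have hstep : pvAStep active prev_board_state state (.ok c) k = .ok (c + 1) := by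
          simp [pvAStep, hp, ha, hd0]
        rw [hstep, ih]
        simp only [List.any_cons, List.filter_cons, h1, hok, Bool.not_true, Bool.and_false,
          Bool.false_or, Bool.and_true]
        split_ifs with h
        · rfl
        · simp only [Except.ok.injEq, List.length_cons]; push_cast; ring
      · have hok' : pvOkB active prev_board_state state k = false := by simpa using hok
        have hstep : pvAStep active prev_board_state state (.ok c) k = .error false := by
          by_cases hp : pvGetC prev_board_state k = '0'
          · have ha : ¬ String.singleton (pvGetC state k) = active := by
              simp [pvOkB, hp] at hok'; simpa using hok'
            have hd0 : ¬ pvGetC state k = '0' := hp ▸ hd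
            simp [pvAStep, hp, ha, hd0]
          · simp [pvAStep, hp, hd]
        rw [hstep, pvAStep_error]
        simp [List.any_cons, h1, hok']

-- A's two nested loops are the single flat scan of indices 0..41
theorem pv_flat (active prev_board_state state : String) :
    (PySem.List.pyRange 0 6 1).foldl
      (fun acc i => (PySem.List.pyRange 0 7 1).foldl
        (fun acc2 j => pvAStep active prev_board_state state acc2 (i * 7 + j)) acc)
      (Except.ok (0 : Int)) =
    (PySem.List.pyRange 0 42 1).foldl (pvAStep active prev_board_state state) (Except.ok (0 : Int)) := by
  have h : ∀ (acc : Except Bool Int) (i : Int),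
      (PySem.List.pyRange 0 7 1).foldl
        (fun acc2 j => pvAStep active prev_board_state state acc2 (i * 7 + j)) acc =
      ((PySem.List.pyRange 0 7 1).map (fun j => i * 7 + j)).foldl
        (pvAStep active prev_board_state state) acc := by
    intro acc i; rw [List.foldl_map]
  simp only [h]
  have h2 : (PySem.List.pyRange 0 6 1).foldl
      (fun acc i => (((PySem.List.pyRange 0 7 1).map (fun j => i * 7 + j))).foldl
        (pvAStep active prev_board_state state) acc) (Except.ok (0 : Int)) =
      (((PySem.List.pyRange 0 6 1).map (fun i => (PySem.List.pyRange 0 7 1).map (fun j => i * 7 + j))).flatten).foldl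
        (pvAStep active prev_board_state state) (Except.ok (0 : Int)) := by
    rw [List.foldl_flatten, List.foldl_map]
  rw [h2]
  have h3 : ((PySem.List.pyRange 0 6 1).map (fun i => (PySem.List.pyRange 0 7 1).map (fun j => i * 7 + j))).flatten
      = PySem.List.pyRange 0 42 1 := by decide
  rw [h3]

-- specification of B's phase-1 loop: it returns the first index ≥ k where the boards differ
-- (up to 42), all earlier indices agree, and at the result (if < 42) they differ
theorem pvFindFrom_spec (prev_board_state state : String) :
    ∀ n k, 42 - k = n → k ≤ 42 →
      k ≤ pvFindFrom prev_board_state state k ∧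
      pvFindFrom prev_board_state state k ≤ 42 ∧
      (∀ j : Nat, k ≤ j → j < pvFindFrom prev_board_state state k →
        pvGetC prev_board_state (j : Int) = pvGetC state (j : Int)) ∧
      (pvFindFrom prev_board_state state k < 42 →
        pvGetC prev_board_state ((pvFindFrom prev_board_state state k : Nat) : Int) ≠
          pvGetC state ((pvFindFrom prev_board_state state k : Nat) : Int)) := by
  intro n
  induction n with
  | zero =>
    intro k hn hk
    have hk42 : k = 42 := by omega
    subst hk42
    have hfix : pvFindFrom prev_board_state state 42 = 42 := by
      rw [pvFindFrom]; simp
    rw [hfix]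
    exact ⟨le_refl _, le_refl _, fun j h1 h2 => absurd h2 (by omega), fun h => absurd h (by omega)⟩
  | succ m ih =>
    intro k hn hk
    have hklt : k < 42 := by omega
    rw [pvFindFrom, if_pos hklt]
    by_cases heq : pvGetC prev_board_state (k : Int) == pvGetC state (k : Int)
    · rw [if_pos heq]
      obtain ⟨h1, h2, h3, h4⟩ := ih (k + 1) (by omega) (by omega)
      refine ⟨by omega, h2, ?_, h4⟩
      intro j hj hj2
      rcases Nat.eq_or_lt_of_le hj with hjk | hjk
      · subst hjk; exact eq_of_beq heq
      · exact h3 j hjk hj2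
    · rw [if_neg heq]
      refine ⟨le_refl _, by omega, by omega, fun _ => ?_⟩
      intro hc
      exact heq (by simp [hc])

theorem pvFilter_singleton (q : Nat → Bool) (n k0 : Nat) (h0 : k0 < n) (hq : q k0 = true)
    (hu : ∀ j, j < n → q j = true → j = k0) : (List.range n).filter q = [k0] := by
  induction n with
  | zero => omega
  | succ m ih =>
    rw [List.range_succ, List.filter_append]
    rcases Nat.eq_or_lt_of_le (Nat.lt_succ_iff.mp h0) with hk | hk
    · subst hk
      have hnone : (List.range k0).filter q = [] := by
        rw [List.filter_eq_nil_iff]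
        intro j hj hqj
        have := hu j (by simp at hj; omega) hqj
        simp at hj; omega
      simp [hnone, hq]
    · have hm : (List.range m).filter q = [k0] := ih hk (fun j hj hq2 => hu j (by omega) hq2)
      have hqm : q m = false := by
        by_contra hc
        have := hu m (by omega) (by simpa using hc)
        omega
      simp [hm, hqm]

-- ===== VERDICT helper: the main equivalence proof =====
theorem verify_board_state_difference_spec : Claim_equal_verify_board_state_difference := by
  intro active prev_board_state state _ hpre
  unfold Spec_verify_board_state_difference
  unfold verify_board_state_difference verify_board_state_difference_alt
  rw [pv_flat, pvAStep_foldl]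
  obtain ⟨hf0, hf42, hfeq, hfdiff⟩ := pvFindFrom_spec prev_board_state state 42 0 rfl (by omega)
  set k0 : Nat := pvFindFrom prev_board_state state 0 with hk0
  have hL : PySem.List.pyRange 0 42 1 = (List.range 42).map (fun n : Nat => (n : Int)) := by decide
  -- diffs as characterized through find: index j < 42 differs iff k0 ≤ j and it differs
  by_cases hbad : ∃ j : Nat, j < 42 ∧ pvDiffB prev_board_state state (j : Int) = true ∧
      pvOkB active prev_board_state state (j : Int) = false
  · -- A returns False via the early return; show B is False too
    obtain ⟨j, hj42, hjd, hjok⟩ := hbad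
    have hany : ((PySem.List.pyRange 0 42 1).any
        (fun k => pvDiffB prev_board_state state k && !pvOkB active prev_board_state state k)) = true := by
      rw [hL, List.any_map, List.any_eq_true]
      exact ⟨j, by simp [List.mem_range, hj42], by simp [hjd, hjok]⟩
    rw [if_pos hany]
    -- a diff exists, so k0 < 42
    have hk0lt : k0 < 42 := by
      rcases Nat.eq_or_lt_of_le hf42 with h | h
      · exfalso
        have := hfeq j (by omega) (by omega)
        simp [pvDiffB, this] at hjd
      · exact h
    have hne : ¬ (k0 = 42) := by omega
    rw [if_neg hne]
    have hk0d := hfdiff hk0lt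
    -- minimality: j is not below k0
    have hk0j : k0 ≤ j := by
      by_contra hc
      have := hfeq j (by omega) (by omega)
      simp [pvDiffB, this] at hjd
    by_cases hok : pvOkB active prev_board_state state (k0 : Int) = true
    · -- good change at k0, but the bad diff j lies strictly after it: the suffix check fails
      have hcond : (pvGetC prev_board_state (k0 : Int) != '0' ||
          String.singleton (pvGetC state (k0 : Int)) != active) = false := by
        simp only [pvOkB, Bool.and_eq_true, beq_iff_eq] at hok
        simp [hok.1, hok.2]
      rw [hcond]
      simp only [Bool.false_eq_true, if_false]
      have hjk0 : k0 ≠ j := by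
        intro h; rw [← h] at hjok
        simp [hok] at hjok
      have hall : ((PySem.List.pyRange ((k0 : Int) + 1) 42 1).all
          (fun j => pvGetC prev_board_state j == pvGetC state j)) = false := by
        rw [Bool.eq_false_iff]
        intro hc
        rw [List.all_eq_true] at hc
        have hmem : (j : Int) ∈ PySem.List.pyRange ((k0 : Int) + 1) 42 1 := by
          rw [PySem.List.mem_pyRange_one]
          constructor
          · have : k0 < j := by omega
            exact_mod_cast this
          · exact_mod_cast hj42
        have := hc _ hmem
        simp only [beq_iff_eq] at this
        simp [pvDiffB, this] at hjd
      rw [hall]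
    · -- the change point itself is bad: B's classification fails
      have hcond : (pvGetC prev_board_state (k0 : Int) != '0' ||
          String.singleton (pvGetC state (k0 : Int)) != active) = true := by
        simp only [pvOkB, Bool.and_eq_true, beq_iff_eq, not_and] at hok
        rcases eq_or_ne (pvGetC prev_board_state (k0 : Int)) '0' with h | h
        · have := hok h
          simp [h, this]
        · simp [h]
      rw [hcond]
      simp
  · -- no bad difference: A returns decide(count = 1)
    push Not at hbad
    have hany : ((PySem.List.pyRange 0 42 1).any
        (fun k => pvDiffB prev_board_state state k && !pvOkB active prev_board_state state k)) = false := by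
      rw [hL, List.any_map, Bool.eq_false_iff]
      intro hc
      rw [List.any_eq_true] at hc
      obtain ⟨j, hjm, hj⟩ := hc
      simp only [Function.comp_apply, Bool.and_eq_true, Bool.not_eq_true'] at hj
      exact absurd (hbad j (List.mem_range.mp hjm) hj.1) (by simp [hj.2])
    rw [if_neg (by simp [hany])]
    rcases Nat.eq_or_lt_of_le hf42 with hkeq | hk0lt
    · -- no change at all: count = 0, B takes the k = 42 branch
      have hnone : ∀ j : Nat, j < 42 → pvDiffB prev_board_state state (j : Int) = false := by
        intro j hj
        have := hfeq j (by omega) (by omega)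
        simp [pvDiffB, this]
      have hfilt : ((PySem.List.pyRange 0 42 1).filter
          (fun k => pvDiffB prev_board_state state k && pvOkB active prev_board_state state k)) = [] := by
        rw [hL, List.filter_map, List.map_eq_nil_iff, List.filter_eq_nil_iff]
        intro j hj
        simp [hnone j (List.mem_range.mp hj)]
      rw [hfilt, if_pos (by omega)]
      simp
    · have hne : ¬ (k0 = 42) := by omega
      rw [if_neg hne]
      have hk0d : pvDiffB prev_board_state state (k0 : Int) = true := by
        simp [pvDiffB]
        exact fun h => (hfdiff hk0lt) h.symm
      have hok : pvOkB active prev_board_state state (k0 : Int) = true := by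
        by_contra hc
        exact absurd (hbad k0 hk0lt hk0d) (by simpa using hc)
      have hcond : (pvGetC prev_board_state (k0 : Int) != '0' ||
          String.singleton (pvGetC state (k0 : Int)) != active) = false := by
        simp only [pvOkB, Bool.and_eq_true, beq_iff_eq] at hok
        simp [hok.1, hok.2]
      rw [hcond]
      simp only [Bool.false_eq_true, if_false]
      by_cases hafter : ∃ j : Nat, k0 < j ∧ j < 42 ∧ pvDiffB prev_board_state state (j : Int) = true
      · -- a second change after k0: B's suffix check fails, A's count is ≥ 2
        obtain ⟨j, hjk0, hj42, hjd⟩ := hafter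
        have hall : ((PySem.List.pyRange ((k0 : Int) + 1) 42 1).all
            (fun j => pvGetC prev_board_state j == pvGetC state j)) = false := by
          rw [Bool.eq_false_iff]
          intro hc
          rw [List.all_eq_true] at hc
          have hmem : (j : Int) ∈ PySem.List.pyRange ((k0 : Int) + 1) 42 1 := by
            rw [PySem.List.mem_pyRange_one]
            exact ⟨by exact_mod_cast hjk0, by exact_mod_cast hj42⟩
          have := hc _ hmem
          simp only [beq_iff_eq] at this
          simp [pvDiffB, this] at hjd
        rw [hall]
        have hjok : pvOkB active prev_board_state state (j : Int) = true := by
          by_contra hc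
          exact absurd (hbad j hj42 hjd) (by simpa using hc)
        -- both k0 and j are in the filtered list, which is duplicate-free, so count ≠ 1
        have hfi : ((PySem.List.pyRange 0 42 1).filter
            (fun k => pvDiffB prev_board_state state k && pvOkB active prev_board_state state k)) =
            ((List.range 42).filter
              (fun n : Nat => pvDiffB prev_board_state state (n : Int) && pvOkB active prev_board_state state (n : Int))).map
              (fun n : Nat => (n : Int)) := by
          rw [hL, List.filter_map]; rfl
        rw [hfi]
        rw [decide_eq_false_iff_not]
        intro hc
        rw [List.length_map] at hc
        have hlen : ((List.range 42).filter
            (fun n : Nat => pvDiffB prev_board_state state (n : Int) && pvOkB active prev_board_state state (n : Int))).length = 1 := by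
          omega
        obtain ⟨a, ha⟩ := List.length_eq_one_iff.mp hlen
        have hm1 : k0 ∈ (List.range 42).filter
            (fun n : Nat => pvDiffB prev_board_state state (n : Int) && pvOkB active prev_board_state state (n : Int)) := by
          rw [List.mem_filter, List.mem_range]
          exact ⟨hk0lt, by simp [hk0d, hok]⟩
        have hm2 : j ∈ (List.range 42).filter
            (fun n : Nat => pvDiffB prev_board_state state (n : Int) && pvOkB active prev_board_state state (n : Int)) := by
          rw [List.mem_filter, List.mem_range]
          exact ⟨hj42, by simp [hjd, hjok]⟩
        rw [ha, List.mem_singleton] at hm1 hm2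
        omega
      · -- exactly one change, and it is good: both return True
        push Not at hafter
        have hall : ((PySem.List.pyRange ((k0 : Int) + 1) 42 1).all
            (fun j => pvGetC prev_board_state j == pvGetC state j)) = true := by
          rw [List.all_eq_true]
          intro x hx
          rw [PySem.List.mem_pyRange_one] at hx
          obtain ⟨hx1, hx2⟩ := hx
          have hx0 : 0 ≤ x := by omega
          obtain ⟨m, rfl⟩ := Int.eq_ofNat_of_zero_le hx0
          have hm1 : k0 < m := by exact_mod_cast hx1
          have hm2 : m < 42 := by exact_mod_cast hx2
          have h2 : pvGetC state (m : Int) = pvGetC prev_board_state (m : Int) := by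
            have := hafter m hm1 hm2
            simpa [pvDiffB] using this
          simp [h2]
        rw [hall]
        have hsing : ((List.range 42).filter
            (fun n : Nat => pvDiffB prev_board_state state (n : Int) && pvOkB active prev_board_state state (n : Int))) = [k0] := by
          apply pvFilter_singleton _ _ _ hk0lt (by simp [hk0d, hok])
          intro j hj42 hq
          simp only [Bool.and_eq_true] at hq
          by_contra hne2
          rcases Nat.lt_or_ge j k0 with h | h
          · have := hfeq j (by omega) h
            simp [pvDiffB, this] at hq
          · exact absurd hq.1 (by simp [hafter j (by omega) hj42])
        have hfi : ((PySem.List.pyRange 0 42 1).filter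
            (fun k => pvDiffB prev_board_state state k && pvOkB active prev_board_state state k)) =
            ((List.range 42).filter
              (fun n : Nat => pvDiffB prev_board_state state (n : Int) && pvOkB active prev_board_state state (n : Int))).map
              (fun n : Nat => (n : Int)) := by
          rw [hL, List.filter_map]; rfl
        rw [hfi, hsing]
        simp
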